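-- pv_equiv track=rewrite | github.com/maccotaro/ai-micro-api-sales | app/services/proposal_formatters.py | format_stage6
-- ===== SOURCE A (Python) =====
-- def format_stage6(out: dict) -> str:
--     """Format Stage 6 (Proposal Context Collection) for display."""
--     parts = []
--     if out.get("proposal_kb_chunks"):
--         parts.append(f"提案書KB: {len(out['proposal_kb_chunks'])}件")
--     if out.get("end_user_psychology_chunks"):
--         parts.append(f"エンドユーザー心理: {len(out['end_user_psychology_chunks'])}件")
--     if out.get("decision_maker_psychology_chunks"):
--         parts.append(f"担当者心理: {len(out['decision_maker_psychology_chunks'])}件")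
--     if out.get("success_cases"):
--         parts.append(f"成功事例: {len(out['success_cases'])}件")
--     if out.get("publication_records"):
--         parts.append(f"実績データ: {len(out['publication_records'])}件")
--     if parts:
--         return "## 提案コンテキスト収集\n\n" + "\n".join(f"- {p}" for p in parts)
--     return "## 提案コンテキスト収集\n\n（データなし）"
-- ===== SOURCE B (Python) =====
-- _STAGE6_SPECS = {
--     "proposal_kb_chunks": (0, "提案書KB"),
--     "end_user_psychology_chunks": (1, "エンドユーザー心理"),
--     "decision_maker_psychology_chunks": (2, "担当者心理"),
--     "success_cases": (3, "成功事例"),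
--     "publication_records": (4, "実績データ"),
-- }
--
--
-- def format_stage6(out: dict) -> str:
--     """Format Stage 6 (Proposal Context Collection) for display."""
--     rows = []
--     for key, val in out.items():
--         spec = _STAGE6_SPECS.get(key)
--         if spec and val:
--             rows.append((spec[0], f"- {spec[1]}: {len(val)}件"))
--     rows.sort(key=lambda r: r[0])
--     if rows:
--         return "## 提案コンテキスト収集\n\n" + "\n".join(line for _, line in rows)
--     return "## 提案コンテキスト収集\n\n（データなし）"
-- ===== Notes on version B (the rewrite author's own statement) =====
-- stated objective: alternative
-- what changed: Instead of probing the dict with five hard-coded key lookups and appending in branch order, B makes a single pass over out.items(), matching each entry against a key->(rank,label) spec dict and collecting (rank, line) rows, then sorts the rows by rank to restore the display order.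
import Mathlib
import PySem

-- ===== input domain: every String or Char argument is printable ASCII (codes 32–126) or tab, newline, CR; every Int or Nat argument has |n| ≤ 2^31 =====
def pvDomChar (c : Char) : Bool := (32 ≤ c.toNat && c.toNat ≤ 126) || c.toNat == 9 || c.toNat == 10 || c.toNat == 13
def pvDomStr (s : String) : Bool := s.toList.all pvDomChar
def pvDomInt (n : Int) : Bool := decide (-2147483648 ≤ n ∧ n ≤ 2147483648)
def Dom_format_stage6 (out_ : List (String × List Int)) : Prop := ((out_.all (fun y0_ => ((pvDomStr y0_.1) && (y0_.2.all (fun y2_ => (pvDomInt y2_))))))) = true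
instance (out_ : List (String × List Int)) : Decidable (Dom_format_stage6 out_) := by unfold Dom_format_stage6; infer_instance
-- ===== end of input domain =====

-- B replaces A's five hard-coded dict probes by one pass over the dict's items matched against a key->(rank,label) spec table, sorting the collected rows by rank; return values proved equal on dicts (association lists with unique keys).

-- ===== PORT A =====
-- truthiness of out.get(key): a present, nonempty list
def pvTruthy6 (o : Option (List Int)) : Bool :=
  match o with
  | some xs => !xs.isEmpty
  | none => false

def format_stage6 (out_ : List (String × List Int)) : String :=
  let d : PySem.Dict String (List Int) := PySem.Dict.mk out_
  let parts : List String := []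
  let parts := if pvTruthy6 (d.get? "proposal_kb_chunks") then
      parts ++ ["提案書KB: " ++ PySem.Int.toStr (((d.get? "proposal_kb_chunks").getD []).length : Int) ++ "件"] else parts
  let parts := if pvTruthy6 (d.get? "end_user_psychology_chunks") then
      parts ++ ["エンドユーザー心理: " ++ PySem.Int.toStr (((d.get? "end_user_psychology_chunks").getD []).length : Int) ++ "件"] else parts
  let parts := if pvTruthy6 (d.get? "decision_maker_psychology_chunks") then
      parts ++ ["担当者心理: " ++ PySem.Int.toStr (((d.get? "decision_maker_psychology_chunks").getD []).length : Int) ++ "件"] else parts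
  let parts := if pvTruthy6 (d.get? "success_cases") then
      parts ++ ["成功事例: " ++ PySem.Int.toStr (((d.get? "success_cases").getD []).length : Int) ++ "件"] else parts
  let parts := if pvTruthy6 (d.get? "publication_records") then
      parts ++ ["実績データ: " ++ PySem.Int.toStr (((d.get? "publication_records").getD []).length : Int) ++ "件"] else parts
  if !parts.isEmpty then
    "## 提案コンテキスト収集\n\n" ++ PySem.Str.join "\n" (parts.map (fun p => "- " ++ p))
  else
    "## 提案コンテキスト収集\n\n（データなし）"

-- ===== PORT B =====
-- Source B's module-level _STAGE6_SPECS dict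
def pvSpecs6 : PySem.Dict String (Int × String) :=
  PySem.Dict.mk
    [("proposal_kb_chunks", (0, "提案書KB")),
     ("end_user_psychology_chunks", (1, "エンドユーザー心理")),
     ("decision_maker_psychology_chunks", (2, "担当者心理")),
     ("success_cases", (3, "成功事例")),
     ("publication_records", (4, "実績データ"))]

-- Source B: one loop over out.items() matching each entry against the spec dict
-- (`if spec and val:` — spec is a found, truthy tuple; val a nonempty list), then rows.sort(keyS=rank).
def format_stage6_alt (out_ : List (String × List Int)) : String :=
  let d : PySem.Dict String (List Int) := PySem.Dict.mk out_
  let rows : List (Int × String) := d.items.foldl (fun acc kv =>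
      match pvSpecs6.get? kv.1 with
      | some spec =>
          if kv.2.isEmpty then acc
          else acc ++ [(spec.1, "- " ++ spec.2 ++ ": " ++ PySem.Int.toStr (kv.2.length : Int) ++ "件")]
      | none => acc) []
  let rows := PySem.List.sorted rows (fun r => r.1) false
  if !rows.isEmpty then
    "## 提案コンテキスト収集\n\n" ++ PySem.Str.join "\n" (rows.map (fun r => r.2))
  else
    "## 提案コンテキスト収集\n\n（データなし）"

-- ===== PRECONDITION & SPEC =====
-- Pre_ excludes association lists with duplicate keys: they do not denote a Python dict
-- (out is a dict, whose keys are unique), so the encoding is ambiguous there.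
def Pre_format_stage6 (out_ : List (String × List Int)) : Prop := (out_.map Prod.fst).Nodup
instance (out_ : List (String × List Int)) : Decidable (Pre_format_stage6 out_) := by unfold Pre_format_stage6; infer_instance

def pvWitness_format_stage6 : (List (String × List Int)) :=
  [("proposal_kb_chunks", [1, 2]), ("success_cases", []), ("other", [3])]

def Spec_format_stage6 (out_ : List (String × List Int)) (out : String) : Prop := out = format_stage6_alt out_
instance (out_ : List (String × List Int)) (out : String) : Decidable (Spec_format_stage6 out_ out) := by unfold Spec_format_stage6; infer_instance

-- ===== CLAIM (what is proved, stated in full; the proofs are below) =====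
def Claim_equal_format_stage6 : Prop := ∀ (out_ : List (String × List Int)), Dom_format_stage6 out_ → Pre_format_stage6 out_ → Spec_format_stage6 out_ (format_stage6 out_)

-- ===== LEMMAS AND PROOFS =====

-- the row a nonempty value list contributes for rank r / label lab
def pvEntV (v : List Int) (r : Int) (lab : String) : List (Int × String) :=
  if v.isEmpty then [] else [(r, "- " ++ lab ++ ": " ++ PySem.Int.toStr (v.length : Int) ++ "件")]

def pvEntO (o : Option (List Int)) (r : Int) (lab : String) : List (Int × String) :=
  match o with
  | some v => pvEntV v r lab
  | none => []

-- what one item contributes in B's loop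
def pvG (kv : String × List Int) : List (Int × String) :=
  match pvSpecs6.get? kv.1 with
  | some spec => pvEntV kv.2 spec.1 spec.2
  | none => []

-- B's rows in display order, read off by the five lookups
def pvTarget (d : PySem.Dict String (List Int)) : List (Int × String) :=
  pvEntO (d.get? "proposal_kb_chunks") 0 "提案書KB" ++
  pvEntO (d.get? "end_user_psychology_chunks") 1 "エンドユーザー心理" ++
  pvEntO (d.get? "decision_maker_psychology_chunks") 2 "担当者心理" ++
  pvEntO (d.get? "success_cases") 3 "成功事例" ++
  pvEntO (d.get? "publication_records") 4 "実績データ"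

theorem pvFoldBody :
    (fun (acc : List (Int × String)) (kv : String × List Int) =>
      match pvSpecs6.get? kv.1 with
      | some spec =>
          if kv.2.isEmpty then acc
          else acc ++ [(spec.1, "- " ++ spec.2 ++ ": " ++ PySem.Int.toStr (kv.2.length : Int) ++ "件")]
      | none => acc)
    = fun acc kv => acc ++ pvG kv := by
  funext acc kv
  unfold pvG pvEntV
  cases h : pvSpecs6.get? kv.1 with
  | none => simp
  | some spec => by_cases he : kv.2.isEmpty <;> simp [he]

theorem pvEntO_none (r : Int) (lab : String) : pvEntO none r lab = [] := rfl
theorem pvEntO_some (v : List Int) (r : Int) (lab : String) :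
    pvEntO (some v) r lab = pvEntV v r lab := rfl

theorem pvPermAux : ∀ (l : List (String × List Int)), (l.map Prod.fst).Nodup →
    (l.flatMap pvG).Perm (pvTarget (PySem.Dict.mk l)) := by
  intro l
  induction l with
  | nil => intro _; simp [pvTarget, pvEntO, PySem.Dict.get?]
  | cons kv t ih =>
    intro hl
    obtain ⟨k, v⟩ := kv
    simp only [List.map_cons, List.nodup_cons] at hl
    obtain ⟨hk, ht⟩ := hl
    have ihh := ih ht
    have hnone : (PySem.Dict.mk t).get? k = none := by
      rw [PySem.Dict.get?_eq_none_iff_not_mem_keys]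
      simpa [PySem.Dict.keys] using hk
    simp only [List.flatMap_cons]
    by_cases h1 : k = "proposal_kb_chunks"
    · subst h1
      have hsp : pvSpecs6.get? "proposal_kb_chunks" = some (0, "提案書KB") := by decide
      simp only [pvTarget, PySem.Dict.get?_mk_cons, beq_iff_eq, String.reduceEq, reduceIte,
        pvEntO_some, pvG, hsp]
      simp only [pvTarget, hnone, pvEntO_none] at ihh
      rw [← Multiset.coe_eq_coe] at ihh ⊢
      simp only [← Multiset.coe_add] at ihh ⊢
      rw [ihh]; abel
    by_cases h2 : k = "end_user_psychology_chunks"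
    · subst h2
      have hsp : pvSpecs6.get? "end_user_psychology_chunks" = some (1, "エンドユーザー心理") := by decide
      simp only [pvTarget, PySem.Dict.get?_mk_cons, beq_iff_eq, String.reduceEq, reduceIte,
        pvEntO_some, pvG, hsp]
      simp only [pvTarget, hnone, pvEntO_none] at ihh
      rw [← Multiset.coe_eq_coe] at ihh ⊢
      simp only [← Multiset.coe_add] at ihh ⊢
      rw [ihh]; abel
    by_cases h3 : k = "decision_maker_psychology_chunks"
    · subst h3
      have hsp : pvSpecs6.get? "decision_maker_psychology_chunks" = some (2, "担当者心理") := by decide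
      simp only [pvTarget, PySem.Dict.get?_mk_cons, beq_iff_eq, String.reduceEq, reduceIte,
        pvEntO_some, pvG, hsp]
      simp only [pvTarget, hnone, pvEntO_none] at ihh
      rw [← Multiset.coe_eq_coe] at ihh ⊢
      simp only [← Multiset.coe_add] at ihh ⊢
      rw [ihh]; abel
    by_cases h4 : k = "success_cases"
    · subst h4
      have hsp : pvSpecs6.get? "success_cases" = some (3, "成功事例") := by decide
      simp only [pvTarget, PySem.Dict.get?_mk_cons, beq_iff_eq, String.reduceEq, reduceIte,
        pvEntO_some, pvG, hsp]
      simp only [pvTarget, hnone, pvEntO_none] at ihh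
      rw [← Multiset.coe_eq_coe] at ihh ⊢
      simp only [← Multiset.coe_add] at ihh ⊢
      rw [ihh]; abel
    by_cases h5 : k = "publication_records"
    · subst h5
      have hsp : pvSpecs6.get? "publication_records" = some (4, "実績データ") := by decide
      simp only [pvTarget, PySem.Dict.get?_mk_cons, beq_iff_eq, String.reduceEq, reduceIte,
        pvEntO_some, pvG, hsp]
      simp only [pvTarget, hnone, pvEntO_none] at ihh
      rw [← Multiset.coe_eq_coe] at ihh ⊢
      simp only [← Multiset.coe_add] at ihh ⊢
      rw [ihh]; abel
    · have hsp : pvSpecs6.get? k = none := by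
        rw [PySem.Dict.get?_eq_none_iff_not_mem_keys]
        simp [pvSpecs6, PySem.Dict.keys]
        tauto
      simp only [pvG, hsp]
      simp only [pvTarget, PySem.Dict.get?_mk_cons, beq_iff_eq]
      rw [if_neg h1, if_neg h2, if_neg h3, if_neg h4, if_neg h5]
      simpa [pvTarget] using ihh

theorem pvEntO_rank (o : Option (List Int)) (r : Int) (lab : String) :
    ∀ x ∈ pvEntO o r lab, x.1 = r := by
  intro x hx
  cases o with
  | none => simp [pvEntO] at hx
  | some v =>
    simp only [pvEntO, pvEntV] at hx
    split at hx <;> simp_all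

theorem pvEntO_pairwise (o : Option (List Int)) (r : Int) (lab : String)
    (R : Int × String → Int × String → Prop) : (pvEntO o r lab).Pairwise R := by
  cases o with
  | none => simp [pvEntO]
  | some v =>
    simp only [pvEntO, pvEntV]
    split <;> simp

theorem pvTarget_pairwise (d : PySem.Dict String (List Int)) :
    (pvTarget d).Pairwise (fun a b => a.1 < b.1) := by
  unfold pvTarget
  simp only [List.pairwise_append, List.mem_append]
  refine ⟨⟨⟨⟨pvEntO_pairwise _ _ _ _, pvEntO_pairwise _ _ _ _, ?_⟩,
    pvEntO_pairwise _ _ _ _, ?_⟩, pvEntO_pairwise _ _ _ _, ?_⟩, pvEntO_pairwise _ _ _ _, ?_⟩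
  · intro a ha b hb
    rw [pvEntO_rank _ _ _ a ha, pvEntO_rank _ _ _ b hb]; norm_num
  · intro a ha b hb
    rcases ha with ha | ha <;>
      rw [pvEntO_rank _ _ _ a ha, pvEntO_rank _ _ _ b hb] <;> norm_num
  · intro a ha b hb
    rcases ha with (ha | ha) | ha <;>
      rw [pvEntO_rank _ _ _ a ha, pvEntO_rank _ _ _ b hb] <;> norm_num
  · intro a ha b hb
    rcases ha with ((ha | ha) | ha) | ha <;>
      rw [pvEntO_rank _ _ _ a ha, pvEntO_rank _ _ _ b hb] <;> norm_num

-- A's per-field optional part string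
def pvOptA (o : Option (List Int)) (pre : String) : List String :=
  if pvTruthy6 o then [pre ++ PySem.Int.toStr ((o.getD []).length : Int) ++ "件"] else []

theorem pvEntO_snd (o : Option (List Int)) (r : Int) (lab pre : String)
    (h : ∀ n, "- " ++ (pre ++ n ++ "件") = "- " ++ lab ++ ": " ++ n ++ "件") :
    (pvEntO o r lab).map Prod.snd = (pvOptA o pre).map (fun p => "- " ++ p) := by
  cases o with
  | none => simp [pvEntO, pvOptA, pvTruthy6]
  | some v =>
    by_cases he : v.isEmpty <;>
      simp [pvEntO, pvEntV, pvOptA, pvTruthy6, he, h]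

theorem pvLineEq1 (n : String) :
    "- " ++ ("提案書KB: " ++ n ++ "件") = "- " ++ "提案書KB" ++ ": " ++ n ++ "件" := by
  simp only [← String.append_assoc]
  rw [show ("- " ++ "提案書KB: " : String) = "- " ++ "提案書KB" ++ ": " from by decide]

theorem pvLineEq2 (n : String) :
    "- " ++ ("エンドユーザー心理: " ++ n ++ "件") = "- " ++ "エンドユーザー心理" ++ ": " ++ n ++ "件" := by
  simp only [← String.append_assoc]
  rw [show ("- " ++ "エンドユーザー心理: " : String) = "- " ++ "エンドユーザー心理" ++ ": " from by decide]

theorem pvLineEq3 (n : String) :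
    "- " ++ ("担当者心理: " ++ n ++ "件") = "- " ++ "担当者心理" ++ ": " ++ n ++ "件" := by
  simp only [← String.append_assoc]
  rw [show ("- " ++ "担当者心理: " : String) = "- " ++ "担当者心理" ++ ": " from by decide]

theorem pvLineEq4 (n : String) :
    "- " ++ ("成功事例: " ++ n ++ "件") = "- " ++ "成功事例" ++ ": " ++ n ++ "件" := by
  simp only [← String.append_assoc]
  rw [show ("- " ++ "成功事例: " : String) = "- " ++ "成功事例" ++ ": " from by decide]

theorem pvLineEq5 (n : String) :
    "- " ++ ("実績データ: " ++ n ++ "件") = "- " ++ "実績データ" ++ ": " ++ n ++ "件" := by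
  simp only [← String.append_assoc]
  rw [show ("- " ++ "実績データ: " : String) = "- " ++ "実績データ" ++ ": " from by decide]

-- A's parts list, as the concatenation of the five optional parts
def pvPartsA (d : PySem.Dict String (List Int)) : List String :=
  pvOptA (d.get? "proposal_kb_chunks") "提案書KB: " ++
  pvOptA (d.get? "end_user_psychology_chunks") "エンドユーザー心理: " ++
  pvOptA (d.get? "decision_maker_psychology_chunks") "担当者心理: " ++
  pvOptA (d.get? "success_cases") "成功事例: " ++
  pvOptA (d.get? "publication_records") "実績データ: "

theorem pvA_eq (out_ : List (String × List Int)) :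
    format_stage6 out_ =
      (if !(pvPartsA (PySem.Dict.mk out_)).isEmpty then
        "## 提案コンテキスト収集\n\n" ++
          PySem.Str.join "\n" ((pvPartsA (PySem.Dict.mk out_)).map (fun p => "- " ++ p))
      else "## 提案コンテキスト収集\n\n（データなし）") := by
  unfold format_stage6 pvPartsA pvOptA
  cases h1 : pvTruthy6 ((PySem.Dict.mk out_).get? "proposal_kb_chunks") <;>
  cases h2 : pvTruthy6 ((PySem.Dict.mk out_).get? "end_user_psychology_chunks") <;>
  cases h3 : pvTruthy6 ((PySem.Dict.mk out_).get? "decision_maker_psychology_chunks") <;>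
  cases h4 : pvTruthy6 ((PySem.Dict.mk out_).get? "success_cases") <;>
  cases h5 : pvTruthy6 ((PySem.Dict.mk out_).get? "publication_records") <;>
  simp [h1, h2, h3, h4, h5]

theorem pvTarget_snd (d : PySem.Dict String (List Int)) :
    (pvTarget d).map Prod.snd = (pvPartsA d).map (fun p => "- " ++ p) := by
  unfold pvTarget pvPartsA
  simp only [List.map_append]
  rw [pvEntO_snd _ _ _ _ pvLineEq1, pvEntO_snd _ _ _ _ pvLineEq2,
      pvEntO_snd _ _ _ _ pvLineEq3, pvEntO_snd _ _ _ _ pvLineEq4,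
      pvEntO_snd _ _ _ _ pvLineEq5]

-- ===== VERDICT (by name: the statement is the Claim_ definition above) =====
theorem format_stage6_spec : Claim_equal_format_stage6 := by
  intro out_ _ hpre
  unfold Spec_format_stage6 format_stage6_alt
  simp only [pvFoldBody, PySem.List.foldl_append_eq_flatMap, List.nil_append]
  have hperm : (out_.flatMap pvG).Perm (pvTarget (PySem.Dict.mk out_)) := pvPermAux out_ hpre
  rw [show PySem.List.sorted (List.flatMap pvG out_) (fun r : Int × String => r.1)
        = pvTarget (PySem.Dict.mk out_) from
      PySem.List.sorted_eq_of_perm_of_pairwise_lt _ _ _ hperm.symm (pvTarget_pairwise _)]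
  rw [pvA_eq]
  have hsnd := pvTarget_snd (PySem.Dict.mk out_)
  have hemp : (pvTarget (PySem.Dict.mk out_)).isEmpty = (pvPartsA (PySem.Dict.mk out_)).isEmpty := by
    have := congrArg List.isEmpty hsnd
    simpa using this
  cases hp : (pvPartsA (PySem.Dict.mk out_)).isEmpty <;>
    simp [hp, hemp, hsnd, (show (fun r : Int × String => r.2) = Prod.snd from rfl)]
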